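-- pv_equiv track=rewrite | github.com/kedarrudrawar/Rosalind-Solutions | ShortestRearrangement.py | findCycles_single_chrom
-- ===== SOURCE A (Python) =====
-- import math
--
-- def nodeToCycleInd(nodeNum):
--     return int(math.ceil(nodeNum/2) - 1)
--
-- def findCycles_single_chrom(coloredEdges, max_val):
--     cycle_ind_array = [i for i in range(max_val // 2)]
--     for edge in coloredEdges:
--         start, end = edge[0], edge[1]
--         start_ind = nodeToCycleInd(start)
--         end_ind = nodeToCycleInd(end)
--
--         orig_start = cycle_ind_array[start_ind]
--         orig_end = cycle_ind_array[end_ind]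
--
--         cycle_ind_array[start_ind] = min(cycle_ind_array[start_ind], cycle_ind_array[end_ind])
--         cycle_ind_array[end_ind] = min(cycle_ind_array[start_ind], cycle_ind_array[end_ind])
--
--         for i, elem in enumerate(cycle_ind_array):
--             if elem == orig_start or elem == orig_end:
--                 cycle_ind_array[i] = cycle_ind_array[start_ind]
--
--     return cycle_ind_array
-- ===== SOURCE B (Python) =====
-- import math
--
-- def nodeToCycleInd(nodeNum):
--     return int(math.ceil(nodeNum/2) - 1)
--
-- def findCycles_single_chrom(coloredEdges, max_val):
--     # Merge components via a label -> member-positions index: each union relabels only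
--     # the losing component's members instead of rescanning the whole array per edge.
--     m = max_val // 2
--     labels = list(range(m))
--     members = {i: [i] for i in range(m)}
--     for edge in coloredEdges:
--         la = labels[nodeToCycleInd(edge[0])]
--         lb = labels[nodeToCycleInd(edge[1])]
--         if la == lb:
--             continue
--         win, lose = (la, lb) if la < lb else (lb, la)
--         losing = members[lose]
--         for i in losing:
--             labels[i] = win
--         members[win].extend(losing)
--         del members[lose]
--     return labels
-- ===== Notes on version B (the rewrite author's own statement) =====
-- stated objective: faster
-- what changed: Instead of rescanning and rewriting the whole cycle array for every edge, B keeps a dict from component label to its member positions and on each union relabels only the losing (larger-label) component's members, then merges the member lists.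
import Mathlib
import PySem

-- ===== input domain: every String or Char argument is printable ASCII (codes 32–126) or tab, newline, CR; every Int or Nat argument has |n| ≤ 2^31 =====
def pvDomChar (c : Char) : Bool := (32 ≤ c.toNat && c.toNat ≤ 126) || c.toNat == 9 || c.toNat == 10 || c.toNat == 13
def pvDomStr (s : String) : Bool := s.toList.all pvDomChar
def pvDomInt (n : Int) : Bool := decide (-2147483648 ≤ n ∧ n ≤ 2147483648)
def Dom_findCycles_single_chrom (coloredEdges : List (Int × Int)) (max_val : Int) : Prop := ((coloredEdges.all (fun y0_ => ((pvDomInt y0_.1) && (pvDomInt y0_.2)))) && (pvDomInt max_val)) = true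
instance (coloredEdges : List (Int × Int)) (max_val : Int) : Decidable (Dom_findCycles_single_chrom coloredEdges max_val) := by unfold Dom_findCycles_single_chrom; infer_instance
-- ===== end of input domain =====

-- B replaces A's whole-array rescan per edge with a label -> member-positions index so each
-- union relabels only the losing component's members (objective: faster). Return value only.

-- ===== PORT A =====
-- math.ceil(nodeNum/2) is ported as the exact ceiling division -((-nodeNum)//2): exact on the
-- stated domain (|nodeNum| <= 2^31 keeps nodeNum/2 an exact float).
def nodeToCycleInd (nodeNum : Int) : Int :=
  -(PySem.Int.floordiv (-nodeNum) 2) - 1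

-- the 'for i, elem in enumerate(cycle_ind_array)' relabelling loop: index-at-a-time over the
-- list being mutated (Python iterates the live list), re-reading cycle_ind_array[start_ind]
def pvRelabelA (sInd la lb : Int) (i : Nat) (c : List Int) : List Int :=
  if h : i < c.length then
    pvRelabelA sInd la lb (i + 1)
      (if c.getD i 0 = la ∨ c.getD i 0 = lb then c.set i (PySem.List.pyGetD c sInd 0) else c)
  else c
termination_by c.length - i
decreasing_by
  split
  · simp only [List.length_set]; omega
  · omega

-- the body of A's 'for edge in coloredEdges' loop
def pvStepA (xs : List Int) (edge : Int × Int) : List Int :=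
  let startInd := nodeToCycleInd edge.1
  let endInd := nodeToCycleInd edge.2
  let origStart := PySem.List.pyGetD xs startInd 0
  let origEnd := PySem.List.pyGetD xs endInd 0
  let c1 := PySem.List.pySetD xs startInd
    (min (PySem.List.pyGetD xs startInd 0) (PySem.List.pyGetD xs endInd 0))
  let c2 := PySem.List.pySetD c1 endInd
    (min (PySem.List.pyGetD c1 startInd 0) (PySem.List.pyGetD c1 endInd 0))
  pvRelabelA startInd origStart origEnd 0 c2

def findCycles_single_chrom (coloredEdges : List (Int × Int)) (max_val : Int) : List Int :=
  coloredEdges.foldl pvStepA (PySem.List.pyRange 0 (PySem.Int.floordiv max_val 2) 1)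

-- ===== PORT B =====
-- the body of B's edge loop: labels array + members dict (label -> list of member positions)
def pvStepB (st : List Int × PySem.Dict Int (List Int)) (edge : Int × Int) :
    List Int × PySem.Dict Int (List Int) :=
  let la := PySem.List.pyGetD st.1 (nodeToCycleInd edge.1) 0
  let lb := PySem.List.pyGetD st.1 (nodeToCycleInd edge.2) 0
  if la = lb then st
  else
    let win := if la < lb then la else lb
    let lose := if la < lb then lb else la
    let losing := st.2.getD lose []
    (losing.foldl (fun L i => PySem.List.pySetD L i win) st.1,
     (st.2.modify win [] (fun ws => ws ++ losing)).erase lose)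

def findCycles_single_chrom_alt (coloredEdges : List (Int × Int)) (max_val : Int) : List Int :=
  let m := PySem.Int.floordiv max_val 2
  (coloredEdges.foldl pvStepB
    (PySem.List.pyRange 0 m 1,
     PySem.Dict.ofList ((PySem.List.pyRange 0 m 1).map (fun i => (i, [i]))))).1

-- ===== PRECONDITION & SPEC =====
-- Pre_ excludes exactly the inputs where A raises IndexError: an edge endpoint whose cycle
-- index falls outside Python's (wrap-inclusive) index range of the length-(max_val//2) array.
def Pre_findCycles_single_chrom (coloredEdges : List (Int × Int)) (max_val : Int) : Prop :=
  ∀ e ∈ coloredEdges,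
    PySem.Raise.InRange (PySem.Int.floordiv max_val 2).toNat (nodeToCycleInd e.1) ∧
    PySem.Raise.InRange (PySem.Int.floordiv max_val 2).toNat (nodeToCycleInd e.2)
instance (coloredEdges : List (Int × Int)) (max_val : Int) : Decidable (Pre_findCycles_single_chrom coloredEdges max_val) := by unfold Pre_findCycles_single_chrom; infer_instance

def pvWitness_findCycles_single_chrom : (List (Int × Int)) × Int := ([(1, 3), (4, 2)], 4)

def Spec_findCycles_single_chrom (coloredEdges : List (Int × Int)) (max_val : Int) (out : List Int) : Prop := out = findCycles_single_chrom_alt coloredEdges max_val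
instance (coloredEdges : List (Int × Int)) (max_val : Int) (out : List Int) : Decidable (Spec_findCycles_single_chrom coloredEdges max_val out) := by unfold Spec_findCycles_single_chrom; infer_instance

-- ===== CLAIM (what is proved, stated in full; the proofs are below) =====
def Claim_equal_findCycles_single_chrom : Prop := ∀ (coloredEdges : List (Int × Int)) (max_val : Int), Dom_findCycles_single_chrom coloredEdges max_val → Pre_findCycles_single_chrom coloredEdges max_val → Spec_findCycles_single_chrom coloredEdges max_val (findCycles_single_chrom coloredEdges max_val)

-- ===== LEMMAS AND PROOFS =====

def pvNidx (L : Nat) (i : Int) : Nat := if 0 ≤ i then i.toNat else L - (-i).toNat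

lemma pvNidx_lt {L : Nat} {i : Int} (h : PySem.Raise.InRange L i) : pvNidx L i < L := by
  obtain ⟨h1, h2⟩ := h
  unfold pvNidx
  split <;> omega

lemma pvIdx?_eq {L : Nat} {i : Int} (h : PySem.Raise.InRange L i) :
    PySem.List.pyIdx? L i = some (pvNidx L i) := by
  obtain ⟨h1, h2⟩ := h
  simp only [PySem.List.pyIdx?, pvNidx]
  split_ifs <;> rfl

lemma pvGetD_eq {c : List Int} {i : Int} (h : PySem.Raise.InRange c.length i) (d : Int) :
    PySem.List.pyGetD c i d = c.getD (pvNidx c.length i) d := by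
  simp [PySem.List.pyGetD, PySem.List.pyGet?, pvIdx?_eq h, List.getD]

lemma pvSetD_eq {c : List Int} {i : Int} (h : PySem.Raise.InRange c.length i) (v : Int) :
    PySem.List.pySetD c i v = c.set (pvNidx c.length i) v := by
  simp [PySem.List.pySetD, PySem.List.pySet?, pvIdx?_eq h]

def pvF (la lb mu x : Int) : Int := if x = la ∨ x = lb then mu else x

lemma pvRelabelA_eq (sInd la lb mu : Int) :
    ∀ (n k : Nat) (xs : List Int), xs.length - k ≤ n →
    PySem.Raise.InRange xs.length sInd →
    PySem.List.pyGetD xs sInd 0 = mu →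
    pvRelabelA sInd la lb k xs = xs.take k ++ (xs.drop k).map (pvF la lb mu) := by
  intro n
  induction n with
  | zero =>
    intro k xs hn hr hv
    have hk : ¬ k < xs.length := by omega
    rw [pvRelabelA]
    rw [List.drop_eq_nil_of_le (by omega), List.take_of_length_le (by omega)]
    simp [hk]
  | succ n ih =>
    intro k xs hn hr hv
    rw [pvRelabelA]
    by_cases hk : k < xs.length
    · simp only [hk, dif_pos]
      have hck : xs.getD k 0 = xs[k] := List.getD_eq_getElem xs 0 hk
      have hdk : xs.drop k = xs[k] :: xs.drop (k+1) := (List.getElem_cons_drop hk).symm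
      by_cases hc : xs.getD k 0 = la ∨ xs.getD k 0 = lb
      · rw [if_pos hc, hv]
        have hlen : (xs.set k mu).length = xs.length := by simp
        have hr' : PySem.Raise.InRange (xs.set k mu).length sInd := by rwa [hlen]
        have hv' : PySem.List.pyGetD (xs.set k mu) sInd 0 = mu := by
          rw [pvGetD_eq hr']
          have hnn : pvNidx (xs.set k mu).length sInd = pvNidx xs.length sInd := by
            rw [hlen]
          rw [hnn]
          rw [pvGetD_eq hr] at hv
          simp only [List.getD, List.getElem?_set] at hv ⊢
          split_ifs with h1
          · simp
          · exact hv
        rw [ih (k+1) (xs.set k mu) (by simp; omega) hr' hv']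
        rw [hdk]
        simp only [List.map_cons]
        have hF : pvF la lb mu xs[k] = mu := by
          unfold pvF; rw [if_pos (by rwa [hck] at hc)]
        rw [List.drop_set_of_lt (by omega), List.take_set]
        rw [List.take_add_one, List.getElem?_eq_getElem hk]
        simp only [Option.toList_some]
        rw [List.set_append_right _ _ (by simp)]
        have hlt : (List.take k xs).length = k := List.length_take_of_le (by omega)
        simp [hlt, hF]
      · rw [if_neg hc]
        rw [ih (k+1) xs (by omega) hr hv]
        rw [hdk]
        have hF : pvF la lb mu xs[k] = xs[k] := by
          unfold pvF; rw [if_neg (by rwa [hck] at hc)]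
        simp only [List.map_cons, hF]
        have hts : List.take (k+1) xs = List.take k xs ++ [xs[k]] := by
          rw [List.take_add_one, List.getElem?_eq_getElem hk]; rfl
        rw [hts, List.append_assoc, List.singleton_append]
    · rw [List.drop_eq_nil_of_le (by omega), List.take_of_length_le (by omega)]
      simp [hk]

lemma pvSetSelf {L : List Int} {n : Nat} {v : Int} (hv : L[n]? = some v) : L.set n v = L := by
  have hn : n < L.length := by
    by_contra h
    rw [List.getElem?_eq_none (by omega)] at hv
    cases hv
  apply List.ext_getElem?
  intro j
  rw [List.getElem?_set]
  split_ifs with h1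
  · subst h1
    rw [hv.symm]
  · rfl

lemma pvStepA_eq (xs : List Int) (edge : Int × Int)
    (ha : PySem.Raise.InRange xs.length (nodeToCycleInd edge.1))
    (hb : PySem.Raise.InRange xs.length (nodeToCycleInd edge.2)) :
    pvStepA xs edge =
      xs.map (pvF (PySem.List.pyGetD xs (nodeToCycleInd edge.1) 0)
               (PySem.List.pyGetD xs (nodeToCycleInd edge.2) 0)
               (min (PySem.List.pyGetD xs (nodeToCycleInd edge.1) 0)
                    (PySem.List.pyGetD xs (nodeToCycleInd edge.2) 0))) := by
  unfold pvStepA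
  dsimp only
  set A := nodeToCycleInd edge.1 with hAdef
  set B := nodeToCycleInd edge.2 with hBdef
  set la := PySem.List.pyGetD xs A 0 with hladef
  set lb := PySem.List.pyGetD xs B 0 with hlbdef
  set mu := min la lb with hmudef
  set na := pvNidx xs.length A with hnadef
  set nb := pvNidx xs.length B with hnbdef
  have hna : na < xs.length := pvNidx_lt ha
  have hnb : nb < xs.length := pvNidx_lt hb
  have hlaE : la = xs.getD na 0 := pvGetD_eq ha 0
  have hlbE : lb = xs.getD nb 0 := pvGetD_eq hb 0
  rw [pvSetD_eq ha]
  have hlen1 : (xs.set na mu).length = xs.length := by simp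
  have hr1a : PySem.Raise.InRange (xs.set na mu).length A := by rwa [hlen1]
  have hr1b : PySem.Raise.InRange (xs.set na mu).length B := by rwa [hlen1]
  have hnn1 : ∀ i, pvNidx (xs.set na mu).length i = pvNidx xs.length i := by
    intro i; rw [hlen1]
  have hg1a : PySem.List.pyGetD (xs.set na mu) A 0 = mu := by
    rw [pvGetD_eq hr1a, hnn1, ← hnadef]
    simp [List.getD, hna]
  have hg1b : PySem.List.pyGetD (xs.set na mu) B 0 = if nb = na then mu else lb := by
    rw [pvGetD_eq hr1b, hnn1, ← hnbdef]
    by_cases h : nb = na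
    · rw [if_pos h, h]
      simp [List.getD, hna]
    · rw [if_neg h]
      simp only [List.getD, List.getElem?_set]
      rw [if_neg (fun e => h e.symm), hlbE]
      rfl
  rw [hg1a, hg1b]
  have hmin : min mu (if nb = na then mu else lb) = mu := by
    split_ifs
    · exact min_self mu
    · rw [hmudef, min_assoc, min_self]
  rw [hmin, pvSetD_eq hr1b, hnn1, ← hnbdef]
  set c2 := (xs.set na mu).set nb mu with hc2def
  have hlen2 : c2.length = xs.length := by simp [hc2def]
  have hr2a : PySem.Raise.InRange c2.length A := by rwa [hlen2]
  have hg2a : PySem.List.pyGetD c2 A 0 = mu := by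
    rw [pvGetD_eq hr2a]
    have : pvNidx c2.length A = na := by rw [hlen2, ← hnadef]
    rw [this]
    simp only [hc2def, List.getD, List.getElem?_set]
    by_cases h1 : nb = na
    · rw [if_pos h1, if_pos (by simpa using hnb)]
      rfl
    · rw [if_neg h1]
      simp [hna]
  rw [pvRelabelA_eq A la lb mu c2.length 0 c2 (by omega) hr2a hg2a]
  simp only [List.take_zero, List.drop_zero, List.nil_append]
  have hFmu : pvF la lb mu mu = mu := by
    unfold pvF
    rcases min_cases la lb with ⟨h, _⟩ | ⟨h, _⟩ <;> rw [hmudef, h] <;> simp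
  have hxa : xs.getD na 0 = xs[na] := List.getD_eq_getElem xs 0 hna
  have hxb : xs.getD nb 0 = xs[nb] := List.getD_eq_getElem xs 0 hnb
  have hFla : pvF la lb mu (xs[na]) = mu := by
    unfold pvF; rw [if_pos (Or.inl (by rw [← hxa, ← hlaE]))]
  have hFlb : pvF la lb mu (xs[nb]) = mu := by
    unfold pvF; rw [if_pos (Or.inr (by rw [← hxb, ← hlbE]))]
  rw [hc2def, List.map_set, List.map_set, hFmu]
  have e1 : (List.map (pvF la lb mu) xs).set na mu = List.map (pvF la lb mu) xs := by
    apply pvSetSelf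
    rw [List.getElem?_map, List.getElem?_eq_getElem hna]
    simp [hFla]
  rw [e1]
  have e2 : (List.map (pvF la lb mu) xs).set nb mu = List.map (pvF la lb mu) xs := by
    apply pvSetSelf
    rw [List.getElem?_map, List.getElem?_eq_getElem hnb]
    simp [hFlb]
  rw [e2]

def pvInv (labels : List Int) (members : PySem.Dict Int (List Int)) : Prop :=
  ∀ (l i : Int), i ∈ members.getD l [] ↔
    ∃ j : Nat, j < labels.length ∧ i = (j : Int) ∧ labels.getD j 0 = l

lemma pvDict_get?_erase {ν : Type} (d : PySem.Dict Int ν) (k k' : Int) :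
    (d.erase k).get? k' = if k' = k then none else d.get? k' := by
  obtain ⟨items⟩ := d
  simp only [PySem.Dict.erase, PySem.Dict.get?]
  induction items with
  | nil => simp only [List.filter_nil, List.find?_nil, Option.map_none]; split <;> rfl
  | cons p t ih =>
    simp only [List.filter_cons]
    by_cases h1 : p.1 = k
    · have hb : (!(p.1 == k)) = false := by simp [h1]
      rw [hb]
      rw [if_neg (by simp)]
      by_cases h2 : k' = k
      · rw [if_pos h2] at ih ⊢
        exact ih
      · rw [if_neg h2] at ih ⊢
        rw [List.find?_cons_of_neg (by simp [h1]; omega)]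
        exact ih
    · have hb : (!(p.1 == k)) = true := by simp [h1]
      rw [hb]
      rw [if_pos rfl]
      by_cases h2 : p.1 = k'
      · rw [List.find?_cons_of_pos (by simp [h2]), List.find?_cons_of_pos (by simp [h2])]
        rw [if_neg (by omega)]
      · rw [List.find?_cons_of_neg (by simp [h2]), List.find?_cons_of_neg (by simp [h2])]
        exact ih

lemma pvFoldlSet (win : Int) :
    ∀ (S L : List Int),
    (∀ i ∈ S, ∃ j : Nat, j < L.length ∧ i = (j : Int)) →
    ∀ (j : Nat),
      (S.foldl (fun L i => PySem.List.pySetD L i win) L)[j]? =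
        L[j]?.map (fun x => if (j : Int) ∈ S then win else x) := by
  intro S
  induction S with
  | nil =>
    intro L _ j
    simp
  | cons i S' ih =>
    intro L hS j
    obtain ⟨j0, hj0, hij0⟩ := hS i (by simp)
    have hr : PySem.Raise.InRange L.length i := by
      constructor <;> omega
    have hset : PySem.List.pySetD L i win = L.set j0 win := by
      rw [pvSetD_eq hr]
      have : pvNidx L.length i = j0 := by
        unfold pvNidx
        rw [if_pos (by omega)]
        omega
      rw [this]
    simp only [List.foldl_cons, hset]
    rw [ih (L.set j0 win) (by simpa using fun x hx => hS x (List.mem_cons_of_mem _ hx)) j]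
    rw [List.getElem?_set]
    by_cases he : j0 = j
    · subst he
      rw [if_pos rfl, if_pos (by omega)]
      have hLj : L[j0]? = some (L[j0]) := List.getElem?_eq_getElem hj0
      rw [hLj]
      simp only [Option.map_some]
      have hmem : (j0 : Int) ∈ i :: S' := by rw [hij0]; exact List.mem_cons_self
      rw [if_pos hmem]
      split_ifs <;> rfl
    · rw [if_neg he]
      have hfn : (fun x => if (j : Int) ∈ S' then win else x)
          = (fun x => if (j : Int) ∈ i :: S' then win else x) := by
        funext x
        by_cases hm : (j : Int) ∈ S'
        · simp [hm]
        · simp [List.mem_cons, hm, show ¬((j : Int) = i) by omega]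
      rw [hfn]

lemma pvStepB_eq (labels : List Int) (members : PySem.Dict Int (List Int)) (edge : Int × Int)
    (hInv : pvInv labels members) :
    (pvStepB (labels, members) edge).1 =
      labels.map (pvF (PySem.List.pyGetD labels (nodeToCycleInd edge.1) 0)
               (PySem.List.pyGetD labels (nodeToCycleInd edge.2) 0)
               (min (PySem.List.pyGetD labels (nodeToCycleInd edge.1) 0)
                    (PySem.List.pyGetD labels (nodeToCycleInd edge.2) 0))) ∧
    pvInv (pvStepB (labels, members) edge).1 (pvStepB (labels, members) edge).2 := by
  unfold pvStepB
  dsimp only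
  set la := PySem.List.pyGetD labels (nodeToCycleInd edge.1) 0 with hladef
  set lb := PySem.List.pyGetD labels (nodeToCycleInd edge.2) 0 with hlbdef
  by_cases heq : la = lb
  · rw [if_pos heq]
    have hid : pvF la lb (min la lb) = fun x => x := by
      funext x
      unfold pvF
      rw [← heq, min_self]
      split_ifs with h
      · rcases h with h | h <;> omega
      · rfl
    constructor
    · rw [hid, List.map_id']
    · exact hInv
  · rw [if_neg heq]
    dsimp only
    set win := if la < lb then la else lb with hwin
    set lose := if la < lb then lb else la with hlose
    have hmu : min la lb = win := by
      rw [hwin]; split_ifs with h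
      · exact min_eq_left (le_of_lt h)
      · exact min_eq_right (by omega)
    have hwl : win ≠ lose := by rw [hwin, hlose]; split_ifs <;> omega
    have hcover : ∀ x : Int, (x = la ∨ x = lb) ↔ (x = win ∨ x = lose) := by
      intro x; rw [hwin, hlose]; split_ifs <;> constructor <;> rintro (h | h) <;> omega
    set losing := members.getD lose [] with hlosing
    have hmemL : ∀ i ∈ losing, ∃ j : Nat, j < labels.length ∧ i = (j : Int) ∧ labels.getD j 0 = lose :=
      fun i hi => (hInv lose i).mp hi
    have hpoint := pvFoldlSet win losing labels
      (fun i hi => by obtain ⟨j, hj, hij, _⟩ := hmemL i hi; exact ⟨j, hj, hij⟩)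
    have hmemIff : ∀ (j : Nat), j < labels.length → (((j : Int) ∈ losing) ↔ labels.getD j 0 = lose) := by
      intro j hj
      constructor
      · intro h
        obtain ⟨j', hj', hij', hval⟩ := hmemL _ h
        have : j' = j := by omega
        subst this
        exact hval
      · intro h
        exact (hInv lose (j : Int)).mpr ⟨j, hj, rfl, h⟩
    have h1 : losing.foldl (fun L i => PySem.List.pySetD L i win) labels
        = labels.map (pvF la lb (min la lb)) := by
      apply List.ext_getElem?
      intro j
      rw [hpoint j, List.getElem?_map]
      by_cases hj : j < labels.length
      · rw [List.getElem?_eq_getElem hj]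
        simp only [Option.map_some, Option.some.injEq]
        have hgd : labels.getD j 0 = labels[j] := List.getD_eq_getElem _ _ hj
        by_cases hm : (j : Int) ∈ losing
        · rw [if_pos hm]
          have hv : labels[j] = lose := by rw [← hgd]; exact (hmemIff j hj).mp hm
          unfold pvF
          rw [hmu, if_pos ((hcover _).mpr (Or.inr hv))]
        · rw [if_neg hm]
          have hv : labels[j] ≠ lose := fun e => hm ((hmemIff j hj).mpr (by rw [hgd]; exact e))
          unfold pvF
          rw [hmu]
          by_cases hwv : labels[j] = win
          · rw [if_pos ((hcover _).mpr (Or.inl hwv))]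
            exact hwv
          · rw [if_neg (fun hc => by rcases (hcover _).mp hc with h | h; exact hwv h; exact hv h)]
      · rw [List.getElem?_eq_none (by omega)]
        simp
    refine ⟨h1, ?_⟩
    intro l i
    rw [h1]
    have hg : ((members.modify win [] (fun ws => ws ++ losing)).erase lose).getD l [] =
        (if l = lose then ([] : List Int)
         else if l = win then members.getD win [] ++ losing else members.getD l []) := by
      unfold PySem.Dict.getD
      rw [pvDict_get?_erase]
      by_cases h2 : l = lose
      · rw [if_pos h2, if_pos h2]
        rfl
      · rw [if_neg h2, if_neg h2]
        unfold PySem.Dict.modify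
        by_cases h3 : l = win
        · subst h3
          rw [PySem.Dict.get?_insert_self]
          simp [PySem.Dict.getD]
        · rw [if_neg h3, PySem.Dict.get?_insert_of_ne _ _ h3]
    set f := pvF la lb (min la lb) with hf
    have hR : ∀ (j : Nat), j < labels.length → (labels.map f).getD j 0 = f (labels.getD j 0) := by
      intro j hj
      rw [List.getD_eq_getElem _ _ (by simpa using hj), List.getElem_map,
        List.getD_eq_getElem _ _ hj]
    have hfwin : ∀ x : Int, f x = win ↔ (x = win ∨ x = lose) := by
      intro x
      rw [hf]; unfold pvF; rw [hmu]
      split_ifs with h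
      · simp [(hcover x).mp h]
      · constructor
        · intro hx; exact Or.inl hx
        · rintro (hx | hx)
          · exact hx
          · exact absurd ((hcover x).mpr (Or.inr hx)) h
    have hfnl : ∀ x : Int, f x ≠ lose := by
      intro x
      rw [hf]; unfold pvF; rw [hmu]
      split_ifs with h
      · exact hwl
      · exact fun e => h ((hcover x).mpr (Or.inr e))
    have hfother : ∀ x : Int, l ≠ win → l ≠ lose → (f x = l ↔ x = l) := by
      intro x hlw hll
      rw [hf]; unfold pvF; rw [hmu]
      split_ifs with h
      · constructor
        · intro e; exact absurd e.symm hlw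
        · intro e
          rcases (hcover x).mp h with hx | hx
          · exact absurd (e ▸ hx : l = win).symm (fun z => hlw z.symm)
          · exact absurd (e ▸ hx : l = lose).symm (fun z => hll z.symm)
      · exact Iff.rfl
    rw [hg]
    by_cases h2 : l = lose
    · subst h2
      rw [if_pos rfl]
      simp only [List.not_mem_nil, false_iff]
      rintro ⟨j, hj, hij, hval⟩
      have hj' : j < labels.length := by simpa using hj
      rw [hR j hj'] at hval
      exact hfnl _ hval
    · rw [if_neg h2]
      by_cases h3 : l = win
      · subst h3
        rw [if_pos rfl]
        constructor
        · intro h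
          rcases List.mem_append.mp h with h | h
          · obtain ⟨j, hj, hij, hval⟩ := (hInv win i).mp h
            exact ⟨j, by simpa using hj, hij, by rw [hR j hj]; exact (hfwin _).mpr (Or.inl hval)⟩
          · obtain ⟨j, hj, hij, hval⟩ := hmemL i h
            exact ⟨j, by simpa using hj, hij, by rw [hR j hj]; exact (hfwin _).mpr (Or.inr hval)⟩
        · rintro ⟨j, hj, hij, hval⟩
          have hj' : j < labels.length := by simpa using hj
          rw [hR j hj'] at hval
          rcases (hfwin _).mp hval with h | h
          · exact List.mem_append.mpr (Or.inl ((hInv win i).mpr ⟨j, hj', hij, h⟩))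
          · exact List.mem_append.mpr (Or.inr ((hInv lose i).mpr ⟨j, hj', hij, h⟩))
      · rw [if_neg h3]
        constructor
        · intro h
          obtain ⟨j, hj, hij, hval⟩ := (hInv l i).mp h
          exact ⟨j, by simpa using hj, hij, by rw [hR j hj]; exact (hfother _ h3 h2).mpr hval⟩
        · rintro ⟨j, hj, hij, hval⟩
          have hj' : j < labels.length := by simpa using hj
          rw [hR j hj'] at hval
          exact (hInv l i).mpr ⟨j, hj', hij, (hfother _ h3 h2).mp hval⟩

lemma pvGet?_update (l : Int) :
    ∀ (ks : List Int) (d : PySem.Dict Int (List Int)),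
    (ks.foldl (fun acc i => acc.insert i [i]) d).get? l = if l ∈ ks then some [l] else d.get? l := by
  intro ks
  induction ks with
  | nil => intro d; simp
  | cons k ks' ih =>
    intro d
    simp only [List.foldl_cons]
    rw [ih]
    by_cases hm : l ∈ ks'
    · simp [hm]
    · rw [if_neg hm]
      by_cases hk : l = k
      · subst hk
        rw [PySem.Dict.get?_insert_self]
        simp
      · rw [PySem.Dict.get?_insert_of_ne _ _ hk]
        simp [List.mem_cons, hk, hm]

lemma pvInv_init (m : Int) :
    pvInv (PySem.List.pyRange 0 m 1)
      (PySem.Dict.ofList ((PySem.List.pyRange 0 m 1).map (fun i => (i, [i])))) := by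
  intro l i
  have hget : (PySem.Dict.ofList ((PySem.List.pyRange 0 m 1).map (fun i => (i, [i])))).get? l
      = if l ∈ PySem.List.pyRange 0 m 1 then some [l] else none := by
    unfold PySem.Dict.ofList PySem.Dict.update
    rw [List.foldl_map]
    rw [pvGet?_update l]
    rfl
  unfold PySem.Dict.getD
  rw [hget]
  have hlen : (PySem.List.pyRange 0 m 1).length = m.toNat := by
    rw [PySem.List.length_pyRange_one]
    simp
  constructor
  · intro h
    by_cases hm : l ∈ PySem.List.pyRange 0 m 1
    · rw [if_pos hm] at h
      simp only [Option.getD_some, List.mem_singleton] at h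
      subst h
      have hb := PySem.List.mem_pyRange_one.mp hm
      refine ⟨i.toNat, by omega, by omega, ?_⟩
      rw [List.getD_eq_getElem _ _ (by omega), PySem.List.getElem_pyRange_one]
      omega
    · rw [if_neg hm] at h
      simp at h
  · rintro ⟨j, hj, hij, hval⟩
    rw [List.getD_eq_getElem _ _ hj, PySem.List.getElem_pyRange_one] at hval
    have hm : l ∈ PySem.List.pyRange 0 m 1 := PySem.List.mem_pyRange_one.mpr (by omega)
    rw [if_pos hm]
    simp only [Option.getD_some, List.mem_singleton]
    omega

lemma pvLoop_eq :
    ∀ (edges : List (Int × Int)) (labels : List Int) (members : PySem.Dict Int (List Int)),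
    (∀ e ∈ edges, PySem.Raise.InRange labels.length (nodeToCycleInd e.1) ∧
                  PySem.Raise.InRange labels.length (nodeToCycleInd e.2)) →
    pvInv labels members →
    edges.foldl pvStepA labels = (edges.foldl pvStepB (labels, members)).1 := by
  intro edges
  induction edges with
  | nil => intro labels members _ _; rfl
  | cons e es ih =>
    intro labels members hpre hInv
    obtain ⟨ha, hb⟩ := hpre e (by simp)
    obtain ⟨hB1, hB2⟩ := pvStepB_eq labels members e hInv
    have hA : pvStepA labels e = (pvStepB (labels, members) e).1 := by
      rw [pvStepA_eq labels e ha hb, hB1]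
    have hsurj : pvStepB (labels, members) e
        = ((pvStepB (labels, members) e).1, (pvStepB (labels, members) e).2) := rfl
    simp only [List.foldl_cons]
    rw [hA, hsurj]
    apply ih
    · intro e' he'
      have hlen : (pvStepB (labels, members) e).1.length = labels.length := by
        rw [hB1]; simp
      rw [hlen]
      exact hpre e' (List.mem_cons_of_mem _ he')
    · exact hB2

-- ===== VERDICT (by name: the statement is the Claim_ definition above) =====
theorem findCycles_single_chrom_spec : Claim_equal_findCycles_single_chrom := by
  intro coloredEdges max_val _hD hPre
  unfold Spec_findCycles_single_chrom findCycles_single_chrom findCycles_single_chrom_alt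
  dsimp only
  apply pvLoop_eq
  · intro e he
    have hlen : (PySem.List.pyRange 0 (PySem.Int.floordiv max_val 2) 1).length
        = (PySem.Int.floordiv max_val 2).toNat := by
      rw [PySem.List.length_pyRange_one]; simp
    rw [hlen]
    exact hPre e he
  · exact pvInv_init _
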